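-- pv_equiv track=rewrite | github.com/nuaa-rm/2023WinterHomework | judge.py | pointsCompare
-- ===== SOURCE A (Python) =====
-- def pointsCompare(ps1, ps2):
--     _in = []
--     _left = []
--     _right = []
--     used = [False] * len(ps2)
--     remap = [-1] * len(ps2)
--     for i in range(len(ps1)):
--         p1 = ps1[i]
--         _use = False
--         for j in range(len(ps2)):
--             p2 = ps2[j]
--             if (p1[0] - p2[0]) ** 2 + (p1[1] - p2[1]) ** 2 < 25:
--                 _in.append(p1)
--                 _use = True
--                 used[j] = True
--                 remap[j] = i
--                 break
--         if not _use:
--             _left.append(p1)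
--     for i in range(len(ps2)):
--         if not used[i]:
--             _right.append(ps2[i])
--     return _in, _left, _right, remap
-- ===== SOURCE B (Python) =====
-- def pointsCompare(ps1, ps2):
--     # Spatial hash grid over ps2 (cell size 5): each ps1 point only inspects the
--     # 9 neighboring cells and picks the lowest-index match, instead of scanning all of ps2.
--     grid = {}
--     for j, p2 in enumerate(ps2):
--         grid.setdefault((p2[0] // 5, p2[1] // 5), []).append(j)
--     _in = []
--     _left = []
--     used = [False] * len(ps2)
--     remap = [-1] * len(ps2)
--     for i, p1 in enumerate(ps1):
--         cx, cy = p1[0] // 5, p1[1] // 5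
--         best = -1
--         for dx in (-1, 0, 1):
--             for dy in (-1, 0, 1):
--                 for j in grid.get((cx + dx, cy + dy), ()):
--                     if (p1[0] - ps2[j][0]) ** 2 + (p1[1] - ps2[j][1]) ** 2 < 25:
--                         if best < 0 or j < best:
--                             best = j
--                         break  # cell lists are ascending: first hit is that cell's minimum
--         if best < 0:
--             _left.append(p1)
--         else:
--             _in.append(p1)
--             used[best] = True
--             remap[best] = i
--     _right = [p for p, u in zip(ps2, used) if not u]
--     return _in, _left, _right, remap
-- ===== Notes on version B (the rewrite author's own statement) =====
-- stated objective: alternative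
-- what changed: B replaces A's inner linear scan of all of ps2 for every ps1 point by a spatial hash grid (dict keyed by (x//5, y//5)) built once over ps2; each ps1 point inspects only the 9 neighboring cells and takes the lowest-index match, which provably equals A's first-scan match.
-- outside the precondition, e.g. on pointsCompare([[0]], []): A returns ([], [[0]], [], []), B raises IndexError; on pointsCompare([], [[7]]): A returns ([], [], [[7]], [-1]), B raises IndexError
import Mathlib
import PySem

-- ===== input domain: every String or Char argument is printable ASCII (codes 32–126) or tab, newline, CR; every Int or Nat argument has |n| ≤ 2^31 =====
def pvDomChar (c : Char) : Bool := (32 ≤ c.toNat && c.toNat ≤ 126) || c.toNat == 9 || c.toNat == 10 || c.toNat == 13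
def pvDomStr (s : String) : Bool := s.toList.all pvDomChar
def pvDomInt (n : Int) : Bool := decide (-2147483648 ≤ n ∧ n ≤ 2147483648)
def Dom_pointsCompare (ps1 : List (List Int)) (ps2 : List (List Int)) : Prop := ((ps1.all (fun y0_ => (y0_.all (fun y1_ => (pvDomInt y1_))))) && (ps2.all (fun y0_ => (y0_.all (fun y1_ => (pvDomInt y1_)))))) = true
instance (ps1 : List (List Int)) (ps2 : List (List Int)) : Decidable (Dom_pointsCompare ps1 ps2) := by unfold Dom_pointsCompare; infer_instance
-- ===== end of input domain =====

-- B replaces A's inner scan of all of ps2 by a spatial hash grid (cell size 5) built once over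
-- ps2: each ps1 point inspects only the 9 neighboring cells and takes the lowest-index match,
-- which provably equals A's first-scan match (objective: alternative).

-- ===== PORT A =====
-- squared distance (p1[0]-p2[0])**2 + (p1[1]-p2[1])**2, shared arithmetic of both Pythons
def pvDist2 (p q : List Int) : Int :=
  (PySem.List.pyGetD p 0 0 - PySem.List.pyGetD q 0 0) ^ 2
    + (PySem.List.pyGetD p 1 0 - PySem.List.pyGetD q 1 0) ^ 2

-- A's inner 'for j in range(len(ps2)): … break' — first j with distance² < 25
def pvFindA (p1 : List Int) : List (List Int) → Nat → Option Nat
  | [], _ => none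
  | p2 :: rest, j => if pvDist2 p1 p2 < 25 then some j else pvFindA p1 rest (j + 1)

-- A's outer loop over ps1 with state (_in, _left, used, remap)
def pvLoopA (ps2 : List (List Int)) :
    List (List Int) → Nat → List (List Int) × List (List Int) × List Bool × List Int →
      List (List Int) × List (List Int) × List Bool × List Int
  | [], _, s => s
  | p1 :: rest, i, (inn, left, used, remap) =>
    match pvFindA p1 ps2 0 with
    | some j => pvLoopA ps2 rest (i + 1) (inn ++ [p1], left, used.set j true, remap.set j (Int.ofNat i))
    | none => pvLoopA ps2 rest (i + 1) (inn, left ++ [p1], used, remap)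

def pointsCompare (ps1 : List (List Int)) (ps2 : List (List Int)) :
    List (List Int) × List (List Int) × List (List Int) × List Int :=
  let s := pvLoopA ps2 ps1 0 ([], [], List.replicate ps2.length false, List.replicate ps2.length (-1))
  -- A's second loop: for i in range(len(ps2)): if not used[i]: _right.append(ps2[i])
  let right := (List.range ps2.length).foldl
    (fun acc i => if s.2.2.1.getD i false then acc else acc ++ [ps2.getD i []]) []
  (s.1, s.2.1, right, s.2.2.2)

-- ===== PORT B =====
-- (p[0] // 5, p[1] // 5), Python floor division
def pvCell (p : List Int) : Int × Int :=
  (PySem.Int.floordiv (PySem.List.pyGetD p 0 0) 5, PySem.Int.floordiv (PySem.List.pyGetD p 1 0) 5)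

-- grid.setdefault(cell(p2), []).append(j) over enumerate(ps2)
def pvGrid (ps2 : List (List Int)) : PySem.Dict (Int × Int) (List Int) :=
  (PySem.List.enumerate ps2).foldl
    (fun d jp => d.modify (pvCell jp.2) [] (fun x => x ++ [jp.1])) PySem.Dict.empty

-- B's innermost loop over one cell's index list: first j in it within distance
def pvFirstHit (p1 : List Int) (ps2 : List (List Int)) : List Int → Option Int
  | [] => none
  | j :: rest =>
    if pvDist2 p1 (PySem.List.pyGetD ps2 j []) < 25 then some j else pvFirstHit p1 ps2 rest

-- B's dx/dy loops: running minimum (sentinel -1) of the per-cell first hits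
def pvBest (grid : PySem.Dict (Int × Int) (List Int)) (ps2 : List (List Int)) (p1 : List Int) : Int :=
  let c := pvCell p1
  [(-1 : Int), 0, 1].foldl (fun best dx =>
    [(-1 : Int), 0, 1].foldl (fun best dy =>
      match pvFirstHit p1 ps2 (grid.getD (c.1 + dx, c.2 + dy) []) with
      | some j => if best < 0 ∨ j < best then j else best
      | none => best) best) (-1)

def pointsCompare_alt (ps1 : List (List Int)) (ps2 : List (List Int)) :
    List (List Int) × List (List Int) × List (List Int) × List Int :=
  let grid := pvGrid ps2
  let s := (PySem.List.enumerate ps1).foldl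
    (fun s ip =>
      let best := pvBest grid ps2 ip.2
      if best < 0 then (s.1, s.2.1 ++ [ip.2], s.2.2)
      else (s.1 ++ [ip.2], s.2.1, PySem.List.pySetD s.2.2.1 best true, PySem.List.pySetD s.2.2.2 best ip.1))
    (([], [], List.replicate ps2.length false, List.replicate ps2.length (-1)) :
      List (List Int) × List (List Int) × List Bool × List Int)
  let right := ((ps2.zip s.2.2.1).filter (fun pu => !pu.2)).map (fun pu => pu.1)
  (s.1, s.2.1, right, s.2.2.2)

-- ===== PRECONDITION & SPEC =====
-- Pre_ restricts to well-formed 2-D points (every point has at least two coordinates): on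
-- malformed points Python A raises IndexError on most shapes (and where it happens to return,
-- e.g. ps2 = [], its value is an accident of which subscripts its loops reach; B raises there too).
def Pre_pointsCompare (ps1 : List (List Int)) (ps2 : List (List Int)) : Prop :=
  (∀ p ∈ ps1, 2 ≤ p.length) ∧ (∀ p ∈ ps2, 2 ≤ p.length)
instance (ps1 : List (List Int)) (ps2 : List (List Int)) : Decidable (Pre_pointsCompare ps1 ps2) := by
  unfold Pre_pointsCompare; infer_instance

def pvWitness_pointsCompare : List (List Int) × List (List Int) :=
  ([[0, 0], [10, 10]], [[1, 1], [30, 30]])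

def Spec_pointsCompare (ps1 : List (List Int)) (ps2 : List (List Int)) (out : List (List Int) × List (List Int) × List (List Int) × List Int) : Prop := out = pointsCompare_alt ps1 ps2
instance (ps1 : List (List Int)) (ps2 : List (List Int)) (out : List (List Int) × List (List Int) × List (List Int) × List Int) : Decidable (Spec_pointsCompare ps1 ps2 out) := by unfold Spec_pointsCompare; infer_instance

-- ===== CLAIM (what is proved, stated in full; the proofs are below) =====
def Claim_equal_pointsCompare : Prop := ∀ (ps1 : List (List Int)) (ps2 : List (List Int)), Dom_pointsCompare ps1 ps2 → Pre_pointsCompare ps1 ps2 → Spec_pointsCompare ps1 ps2 (pointsCompare ps1 ps2)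

-- ===== LEMMAS AND PROOFS =====

-- the shared match predicate
def pvPred (p1 p2 : List Int) : Bool := decide (pvDist2 p1 p2 < 25)

-- q: the predicate on ps2-indices both inner searches decide
def pvQ (p1 : List Int) (ps2 : List (List Int)) (j : Int) : Prop :=
  pvDist2 p1 (PySem.List.pyGetD ps2 j []) < 25

-- A's inner scan is findIdx? shifted by the start counter
theorem pvFindA_eq (p1 : List Int) (l : List (List Int)) (c : Nat) :
    pvFindA p1 l c = (l.findIdx? (pvPred p1)).map (c + ·) := by
  induction l generalizing c with
  | nil => simp [pvFindA]
  | cons p2 rest ih =>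
    simp only [pvFindA, List.findIdx?_cons, pvPred]
    by_cases h : pvDist2 p1 p2 < 25
    · simp [h]
    · simp only [h, decide_false, ih (c + 1)]
      cases rest.findIdx? (pvPred p1) with
      | none => simp
      | some v => simp; omega

-- contents of a grid cell: the indices of ps2-points in that cell, in order
theorem pvGrid_getD (ps2 : List (List Int)) (c : Int × Int) :
    (pvGrid ps2).getD c [] =
      (((PySem.List.enumerate ps2).filter (fun jp => pvCell jp.2 == c)).map (fun jp => jp.1)) := by
  unfold pvGrid
  have h := PySem.Dict.getD_foldl_modify_append
    ((PySem.List.enumerate ps2).map (fun jp : Int × List Int => (pvCell jp.2, jp.1)))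
    PySem.Dict.empty c
  rw [List.foldl_map] at h
  rw [h]
  simp [List.filter_map, List.map_map, Function.comp_def]

theorem mem_pvGrid (ps2 : List (List Int)) (c : Int × Int) (j : Int) :
    j ∈ (pvGrid ps2).getD c [] ↔
      ∃ (k : Nat) (h : k < ps2.length), j = (k : Int) ∧ pvCell ps2[k] = c := by
  rw [pvGrid_getD]
  simp only [List.mem_map, List.mem_filter, PySem.List.mem_enumerate_iff]
  constructor
  · rintro ⟨jp, ⟨⟨k, hk, rfl⟩, hc⟩, rfl⟩
    exact ⟨k, hk, by simp, by simpa using hc⟩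
  · rintro ⟨k, hk, rfl, hc⟩
    exact ⟨((k : Int), ps2[k]), ⟨⟨k, hk, by simp⟩, by simp [hc]⟩, rfl⟩

theorem pvGrid_sorted (ps2 : List (List Int)) (c : Int × Int) :
    ((pvGrid ps2).getD c []).Pairwise (· < ·) := by
  rw [pvGrid_getD]
  exact ((PySem.List.pairwise_lt_enumerate ps2 0).filter _).map _ (fun _ _ h => h)

theorem pvFirstHit_some (p1 : List Int) (ps2 : List (List Int)) (js : List Int) (j : Int)
    (h : pvFirstHit p1 ps2 js = some j) : j ∈ js ∧ pvQ p1 ps2 j := by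
  induction js with
  | nil => simp [pvFirstHit] at h
  | cons j0 rest ih =>
    rw [pvFirstHit] at h
    split at h
    · cases h; exact ⟨List.mem_cons_self, by assumption⟩
    · rcases ih h with ⟨h1, h2⟩; exact ⟨List.mem_cons_of_mem _ h1, h2⟩

theorem pvFirstHit_none (p1 : List Int) (ps2 : List (List Int)) (js : List Int)
    (h : ∀ j ∈ js, ¬ pvQ p1 ps2 j) : pvFirstHit p1 ps2 js = none := by
  induction js with
  | nil => rfl
  | cons j0 rest ih =>
    rw [pvFirstHit, if_neg (show ¬ pvDist2 p1 (PySem.List.pyGetD ps2 j0 []) < 25 from h j0 List.mem_cons_self)]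
    exact ih (fun j hj => h j (List.mem_cons_of_mem _ hj))

theorem pvFirstHit_min (p1 : List Int) (ps2 : List (List Int)) (js : List Int) (k : Int)
    (hs : js.Pairwise (· < ·)) (hm : k ∈ js) (hq : pvQ p1 ps2 k)
    (hlt : ∀ j ∈ js, j < k → ¬ pvQ p1 ps2 j) : pvFirstHit p1 ps2 js = some k := by
  induction js with
  | nil => simp at hm
  | cons j0 rest ih =>
    rcases List.mem_cons.1 hm with rfl | hm'
    · rw [pvFirstHit, if_pos (show pvDist2 p1 (PySem.List.pyGetD ps2 k []) < 25 from hq)]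
    · have hj0k : j0 < k := (List.pairwise_cons.1 hs).1 k hm'
      rw [pvFirstHit, if_neg (show ¬ pvDist2 p1 (PySem.List.pyGetD ps2 j0 []) < 25 from hlt j0 List.mem_cons_self hj0k)]
      exact ih (List.pairwise_cons.1 hs).2 hm' (fun j hj => hlt j (List.mem_cons_of_mem _ hj))

-- a match lies in one of the 9 neighboring cells
theorem pvCell_near (p1 p2 : List Int) (h : pvDist2 p1 p2 < 25) :
    ∃ dx dy : Int, -1 ≤ dx ∧ dx ≤ 1 ∧ -1 ≤ dy ∧ dy ≤ 1 ∧
      pvCell p2 = ((pvCell p1).1 + dx, (pvCell p1).2 + dy) := by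
  unfold pvDist2 at h
  set a := PySem.List.pyGetD p1 0 0
  set b := PySem.List.pyGetD p2 0 0
  set u := PySem.List.pyGetD p1 1 0
  set v := PySem.List.pyGetD p2 1 0
  have hx : (a - b) ^ 2 < 25 := by nlinarith [sq_nonneg (u - v)]
  have hy : (u - v) ^ 2 < 25 := by nlinarith [sq_nonneg (a - b)]
  have hx' : -4 ≤ a - b ∧ a - b ≤ 4 := by constructor <;> nlinarith
  have hy' : -4 ≤ u - v ∧ u - v ≤ 4 := by constructor <;> nlinarith
  refine ⟨PySem.Int.floordiv b 5 - PySem.Int.floordiv a 5,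
          PySem.Int.floordiv v 5 - PySem.Int.floordiv u 5, ?_, ?_, ?_, ?_, ?_⟩
  · rw [PySem.Int.floordiv_eq_ediv_of_pos (by norm_num), PySem.Int.floordiv_eq_ediv_of_pos (by norm_num)]; omega
  · rw [PySem.Int.floordiv_eq_ediv_of_pos (by norm_num), PySem.Int.floordiv_eq_ediv_of_pos (by norm_num)]; omega
  · rw [PySem.Int.floordiv_eq_ediv_of_pos (by norm_num), PySem.Int.floordiv_eq_ediv_of_pos (by norm_num)]; omega
  · rw [PySem.Int.floordiv_eq_ediv_of_pos (by norm_num), PySem.Int.floordiv_eq_ediv_of_pos (by norm_num)]; omega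
  · simp [pvCell]; omega

-- the running-minimum fold: all hits ≥ k and one hit = k ⟹ result k
theorem pvFold_min (hit : Int × Int → Option Int) (L : List (Int × Int)) (k b : Int)
    (hk : 0 ≤ k) (hb : b = -1 ∨ k ≤ b)
    (hge : ∀ c ∈ L, ∀ j, hit c = some j → k ≤ j)
    (hw : (∃ c ∈ L, hit c = some k) ∨ b = k) :
    L.foldl (fun best c =>
      match hit c with
      | some j => if best < 0 ∨ j < best then j else best
      | none => best) b = k := by
  induction L generalizing b with
  | nil =>
    rcases hw with ⟨c, hc, _⟩ | rfl
    · simp at hc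
    · rfl
  | cons c L ih =>
    rw [List.foldl_cons]
    have hge' := fun c' hc' => hge c' (List.mem_cons_of_mem _ hc')
    cases hhit : hit c with
    | none =>
      apply ih b hb hge'
      rcases hw with ⟨c', hc', hh⟩ | rfl
      · rcases List.mem_cons.1 hc' with rfl | hm
        · rw [hhit] at hh; cases hh
        · exact Or.inl ⟨c', hm, hh⟩
      · exact Or.inr rfl
    | some j =>
      have hkj : k ≤ j := hge c List.mem_cons_self j hhit
      set b' : Int := if b < 0 ∨ j < b then j else b with hb'
      have hb'2 : b' = -1 ∨ k ≤ b' := by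
        rw [hb']; split_ifs with hcond
        · exact Or.inr hkj
        · rcases hb with rfl | hkb
          · exact absurd (Or.inl (by norm_num)) hcond
          · exact Or.inr hkb
      apply ih b' hb'2 hge'
      rcases hw with ⟨c', hc', hh⟩ | rfl
      · rcases List.mem_cons.1 hc' with rfl | hm
        · rw [hhit] at hh; cases hh
          right
          rw [hb']; split_ifs with hcond
          · rfl
          · rcases hb with rfl | hkb
            · exact absurd (Or.inl (by norm_num)) hcond
            · simp only [not_or, not_lt] at hcond; omega
        · exact Or.inl ⟨c', hm, hh⟩
      · right
        rw [hb']; split_ifs with hcond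
        · rcases hcond with h1 | h2
          · omega
          · omega
        · rfl

theorem pvFold_none (hit : Int × Int → Option Int) (L : List (Int × Int)) (b : Int)
    (h : ∀ c ∈ L, hit c = none) :
    L.foldl (fun best c =>
      match hit c with
      | some j => if best < 0 ∨ j < best then j else best
      | none => best) b = b := by
  induction L generalizing b with
  | nil => rfl
  | cons c L ih =>
    rw [List.foldl_cons, h c List.mem_cons_self]
    exact ih b (fun c hc => h c (List.mem_cons_of_mem _ hc))

-- the grid search returns exactly A's first-match index (or -1)
theorem pvBest_eq (ps2 : List (List Int)) (p1 : List Int) :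
    pvBest (pvGrid ps2) ps2 p1 =
      match ps2.findIdx? (pvPred p1) with
      | some k => (k : Int)
      | none => -1 := by
  have hfold : pvBest (pvGrid ps2) ps2 p1 =
      ([((pvCell p1).1 + -1, (pvCell p1).2 + -1), ((pvCell p1).1 + -1, (pvCell p1).2 + 0),
        ((pvCell p1).1 + -1, (pvCell p1).2 + 1), ((pvCell p1).1 + 0, (pvCell p1).2 + -1),
        ((pvCell p1).1 + 0, (pvCell p1).2 + 0), ((pvCell p1).1 + 0, (pvCell p1).2 + 1),
        ((pvCell p1).1 + 1, (pvCell p1).2 + -1), ((pvCell p1).1 + 1, (pvCell p1).2 + 0),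
        ((pvCell p1).1 + 1, (pvCell p1).2 + 1)]).foldl
        (fun best c =>
          match pvFirstHit p1 ps2 ((pvGrid ps2).getD c []) with
          | some j => if best < 0 ∨ j < best then j else best
          | none => best) (-1) := rfl
  rw [hfold]
  cases hf : ps2.findIdx? (pvPred p1) with
  | none =>
    have hall : ∀ p2 ∈ ps2, pvPred p1 p2 = false := List.findIdx?_eq_none_iff.1 hf
    apply pvFold_none
    intro c _
    apply pvFirstHit_none
    intro j hj
    rcases (mem_pvGrid ps2 c j).1 hj with ⟨kn, hkn, rfl, _⟩
    have := hall ps2[kn] (List.getElem_mem hkn)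
    simp only [pvPred, decide_eq_false_iff_not] at this
    simpa [pvQ, List.getD_eq_getElem, hkn] using this
  | some k =>
    have hred : (match (some k : Option Nat) with | some k => (k : Int) | none => -1) = (k : Int) := rfl
    rw [hred]
    obtain ⟨hk, hpk, hmin⟩ := List.findIdx?_eq_some_iff_getElem.1 hf
    simp only [pvPred, decide_eq_true_eq] at hpk
    have hmin' : ∀ (jn : Nat), jn < k → ¬ pvDist2 p1 (PySem.List.pyGetD ps2 (jn : Int) []) < 25 := by
      intro jn hjn
      have h1 := hmin jn hjn
      have hjn2 : jn < ps2.length := by omega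
      simp only [pvPred, decide_eq_true_eq] at h1
      simpa [List.getD_eq_getElem, hjn2] using h1
    apply pvFold_min _ _ _ _ (by positivity)
    · exact Or.inl rfl
    · -- all hits ≥ k
      intro c _ j hhit
      rcases pvFirstHit_some p1 ps2 _ j hhit with ⟨hjmem, hq⟩
      rcases (mem_pvGrid ps2 c j).1 hjmem with ⟨kn, hkn, rfl, _⟩
      by_contra hlt
      exact hmin' kn (by omega) hq
    · -- witness
      left
      have hd : pvDist2 p1 ps2[k] < 25 := hpk
      obtain ⟨dx, dy, hdx1, hdx2, hdy1, hdy2, hcell⟩ :=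
        pvCell_near p1 ps2[k] hd
      refine ⟨((pvCell p1).1 + dx, (pvCell p1).2 + dy), ?_, ?_⟩
      · interval_cases dx <;> interval_cases dy <;> simp
      · rw [← hcell]
        apply pvFirstHit_min
        · exact pvGrid_sorted ps2 _
        · exact (mem_pvGrid ps2 _ _).2 ⟨k, hk, rfl, rfl⟩
        · show pvDist2 p1 (PySem.List.pyGetD ps2 (k : Int) []) < 25
          simpa [List.getD_eq_getElem, hk] using hd
        · intro j hjmem hjk
          rcases (mem_pvGrid ps2 _ j).1 hjmem with ⟨kn, hkn, rfl, _⟩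
          exact hmin' kn (by omega)

-- the two outer loops compute the same state
theorem pvLoop_eq (ps2 : List (List Int)) (l : List (List Int)) (i : Nat)
    (s : List (List Int) × List (List Int) × List Bool × List Int) :
    pvLoopA ps2 l i s =
      (PySem.List.enumerate l (i : Int)).foldl
        (fun s ip =>
          let best := pvBest (pvGrid ps2) ps2 ip.2
          if best < 0 then (s.1, s.2.1 ++ [ip.2], s.2.2)
          else (s.1 ++ [ip.2], s.2.1, PySem.List.pySetD s.2.2.1 best true,
                PySem.List.pySetD s.2.2.2 best ip.1)) s := by
  induction l generalizing i s with
  | nil => simp [pvLoopA, PySem.List.enumerate]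
  | cons p1 rest ih =>
    obtain ⟨inn, left, used, remap⟩ := s
    rw [PySem.List.enumerate_cons, List.foldl_cons]
    have hb := pvBest_eq ps2 p1
    have hfa := pvFindA_eq p1 ps2 0
    cases hf : ps2.findIdx? (pvPred p1) with
    | some j =>
      rw [hf] at hb hfa
      simp only [Option.map_some, Nat.zero_add] at hfa
      rw [pvLoopA, hfa]
      have hj0 : ¬ ((j : Int) < 0) := by omega
      simp only [hb, if_neg hj0, PySem.List.pySetD_natCast, Int.ofNat_eq_natCast]
      rw [show ((i : Int) + 1) = ((i + 1 : Nat) : Int) by push_cast; ring]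
      exact ih (i + 1) _
    | none =>
      rw [hf] at hb hfa
      simp only [Option.map_none] at hfa
      rw [pvLoopA, hfa]
      simp only [hb, if_pos (show (-1:Int) < 0 by norm_num)]
      rw [show ((i : Int) + 1) = ((i + 1 : Nat) : Int) by push_cast; ring]
      exact ih (i + 1) _

theorem pvLoopA_used_length (ps2 : List (List Int)) (l : List (List Int)) (i : Nat)
    (s : List (List Int) × List (List Int) × List Bool × List Int) :
    (pvLoopA ps2 l i s).2.2.1.length = s.2.2.1.length := by
  induction l generalizing i s with
  | nil => rfl
  | cons p1 rest ih =>
    obtain ⟨inn, left, used, remap⟩ := s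
    rw [pvLoopA]
    cases pvFindA p1 ps2 0 with
    | some j => rw [ih]; simp
    | none => rw [ih]

-- A's index-loop for _right equals B's zip/filter, given the lengths agree
theorem pvRight_eq (ps2 : List (List Int)) (used : List Bool) (acc : List (List Int))
    (h : used.length = ps2.length) :
    (List.range ps2.length).foldl
        (fun acc i => if used.getD i false then acc else acc ++ [ps2.getD i []]) acc =
      acc ++ ((ps2.zip used).filter (fun pu => !pu.2)).map (fun pu => pu.1) := by
  induction ps2 generalizing used acc with
  | nil => simp
  | cons p ps ih =>
    cases used with
    | nil => simp at h
    | cons b u =>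
      simp only [List.length_cons] at h ⊢
      rw [List.range_succ_eq_map, List.foldl_cons, List.foldl_map]
      have hstep : ∀ (acc' : List (List Int)) (i : Nat),
          (if (b :: u).getD (i + 1) false then acc' else acc' ++ [(p :: ps).getD (i + 1) []])
            = (if u.getD i false then acc' else acc' ++ [ps.getD i []]) := by
        intro acc' i; simp
      simp only [hstep]
      rw [ih u _ (by omega)]
      cases b <;> simp

-- ===== VERDICT (by name: the statement is the Claim_ definition above) =====
theorem pointsCompare_spec : Claim_equal_pointsCompare := by
  intro ps1 ps2 _ _
  show pointsCompare ps1 ps2 = pointsCompare_alt ps1 ps2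
  simp only [pointsCompare, pointsCompare_alt]
  have hs := pvLoop_eq ps2 ps1 0
    ([], [], List.replicate ps2.length false, List.replicate ps2.length (-1))
  rw [Nat.cast_zero] at hs
  rw [← hs]
  have hlen : (pvLoopA ps2 ps1 0
      ([], [], List.replicate ps2.length false, List.replicate ps2.length (-1))).2.2.1.length
      = ps2.length := by
    rw [pvLoopA_used_length]; simp
  rw [pvRight_eq ps2 _ [] hlen]
  simp
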